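-- pv_equiv track=rewrite | github.com/t0r1n88/Lachesis | mental_state/ucla_three_russel.py | calc_value_ucla_three
-- ===== SOURCE A (Python) =====
-- def calc_value_ucla_three(row):
--     """
--     Функция для подсчета значения
--     :return: число
--     """
--     lst_pr = [1,5,6,9,10,15,16,19,20]
--     value_forward = 0  # результат
--     for idx, value in enumerate(row):
--         if idx +1 in lst_pr:
--             if value == 4:
--                 value_forward += 1
--             elif value == 3:
--                 value_forward += 2
--             elif value == 2:
--                 value_forward += 3
--             else:
--                 value_forward += 4
--         else:
--             value_forward += value
--
--     return value_forward
-- ===== SOURCE B (Python) =====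
-- # B: sum the whole row once, then correct only the 9 fixed reverse-scored
-- # positions (0-based); same value as A's per-element branch-and-add scan.
--
-- _REVERSE_POSITIONS = (0, 4, 5, 8, 9, 14, 15, 18, 19)
--
--
-- def _reverse_score(v):
--     # 4 -> 1, 3 -> 2, 2 -> 3, anything else -> 4
--     return 5 - v if 2 <= v <= 4 else 4
--
--
-- def calc_value_ucla_three(row):
--     total = sum(row)
--     n = len(row)
--     for idx in _REVERSE_POSITIONS:
--         if idx < n:
--             v = row[idx]
--             total += _reverse_score(v) - v
--     return total
-- ===== Notes on version B (the rewrite author's own statement) =====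
-- stated objective: faster
-- what changed: B replaces A's per-element membership-test-and-branch scan by a single sum of the row plus a 9-term correction loop over the fixed reverse-scored positions, scoring with an arithmetic clamp (5-v for 2<=v<=4, else 4) instead of A's equality chain.
import Mathlib
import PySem

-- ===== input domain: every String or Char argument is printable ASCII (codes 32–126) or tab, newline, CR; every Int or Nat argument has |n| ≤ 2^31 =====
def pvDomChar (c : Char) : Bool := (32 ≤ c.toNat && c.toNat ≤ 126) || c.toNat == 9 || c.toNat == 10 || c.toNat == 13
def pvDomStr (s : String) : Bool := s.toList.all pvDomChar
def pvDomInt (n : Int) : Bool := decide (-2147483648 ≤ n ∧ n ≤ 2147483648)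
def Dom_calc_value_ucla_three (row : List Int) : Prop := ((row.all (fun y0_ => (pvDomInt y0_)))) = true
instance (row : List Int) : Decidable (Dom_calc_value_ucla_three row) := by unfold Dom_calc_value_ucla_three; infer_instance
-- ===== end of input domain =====

-- B sums the row once and then corrects the 9 fixed reverse-scored positions
-- with an arithmetic clamp, instead of A's per-element membership-test scan.


-- ===== PORT A =====
-- lst_pr from A, as Python ints
def pvLstPr : List Int := [1, 5, 6, 9, 10, 15, 16, 19, 20]

-- A's `for idx, value in enumerate(row)` loop as the obvious structural
-- recursion carrying the index and the accumulator `value_forward`.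
def pvGoA : Nat → Int → List Int → Int
  | _, acc, [] => acc
  | idx, acc, value :: rest =>
      pvGoA (idx + 1)
        (if ((idx : Int) + 1) ∈ pvLstPr then
           (if value = 4 then acc + 1
            else if value = 3 then acc + 2
            else if value = 2 then acc + 3
            else acc + 4)
         else acc + value) rest

def calc_value_ucla_three (row : List Int) : Int := pvGoA 0 0 row

-- ===== PORT B =====
def pvReversePositions : List Nat := [0, 4, 5, 8, 9, 14, 15, 18, 19]

-- _reverse_score(v) = 5 - v if 2 <= v <= 4 else 4
def pvReverseScore (v : Int) : Int := if 2 ≤ v ∧ v ≤ 4 then 5 - v else 4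

-- B: `sum(row)` then the 9-position correction loop; `row[idx]` is guarded by
-- idx < n with idx a nonnegative literal, so List.getD is exact here.
def calc_value_ucla_three_alt (row : List Int) : Int :=
  pvReversePositions.foldl
    (fun total idx =>
      if idx < row.length then
        total + (pvReverseScore (row.getD idx 0) - row.getD idx 0)
      else total)
    (row.foldl (fun a b => a + b) 0)

-- ===== PRECONDITION & SPEC =====
def Spec_calc_value_ucla_three (row : List Int) (out : Int) : Prop := out = calc_value_ucla_three_alt row
instance (row : List Int) (out : Int) : Decidable (Spec_calc_value_ucla_three row out) := by unfold Spec_calc_value_ucla_three; infer_instance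

-- ===== CLAIM (what is proved, stated in full; the proofs are below) =====
def Claim_equal_calc_value_ucla_three : Prop := ∀ (row : List Int), Dom_calc_value_ucla_three row → Spec_calc_value_ucla_three row (calc_value_ucla_three row)

-- ===== LEMMAS AND PROOFS =====

-- A's loop step, written as "add the value, plus a correction on reverse positions".
theorem pvGoA_cons (k : Nat) (a v : Int) (xs : List Int) :
    pvGoA k a (v :: xs) =
      pvGoA (k + 1)
        (a + v + (if k ∈ pvReversePositions then pvReverseScore v - v else 0)) xs := by
  have h : (((k : Int) + 1) ∈ pvLstPr) ↔ (k ∈ pvReversePositions) := by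
    simp [pvLstPr, pvReversePositions]
    omega
  simp only [pvGoA]
  congr 1
  by_cases hk : k ∈ pvReversePositions
  · rw [if_pos (h.mpr hk), if_pos hk]
    unfold pvReverseScore
    split_ifs <;> omega
  · rw [if_neg (fun hm => hk (h.mp hm)), if_neg hk, add_zero]

-- past index 19 A's loop is a plain sum
theorem pvGoA_ge20 (xs : List Int) : ∀ (k : Nat) (a : Int), 20 ≤ k →
    pvGoA k a xs = xs.foldl (fun x y => x + y) a := by
  induction xs with
  | nil => intro k a _; simp [pvGoA]
  | cons v xs ih =>
      intro k a hk
      rw [pvGoA_cons, ih (k + 1) _ (by omega)]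
      have : k ∉ pvReversePositions := by
        intro hm
        have : k ≤ 19 := by
          simp [pvReversePositions] at hm
          omega
        omega
      simp [List.foldl, this]

theorem pvFoldlSum (xs : List Int) : ∀ a : Int,
    xs.foldl (fun x y => x + y) a = a + xs.sum := by
  induction xs with
  | nil => intro a; simp
  | cons v xs ih =>
      intro a
      simp only [List.foldl, List.sum_cons]
      rw [ih (a + v)]
      ring


theorem pvGoA_nil (k : Nat) (a : Int) : pvGoA k a [] = a := rfl

-- ===== VERDICT =====
set_option maxHeartbeats 2000000 in
theorem calc_value_ucla_three_spec : Claim_equal_calc_value_ucla_three := by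
  unfold Claim_equal_calc_value_ucla_three Spec_calc_value_ucla_three
  intro row _
  obtain _ | ⟨a0, row⟩ := row
  · simp [calc_value_ucla_three, calc_value_ucla_three_alt, pvGoA_nil,
      pvReversePositions, List.foldl]
  obtain _ | ⟨a1, row⟩ := row
  · simp [calc_value_ucla_three, calc_value_ucla_three_alt, pvGoA_cons, pvGoA_nil,
      pvReversePositions, List.foldl]
    try ring
  obtain _ | ⟨a2, row⟩ := row
  · simp [calc_value_ucla_three, calc_value_ucla_three_alt, pvGoA_cons, pvGoA_nil,
      pvReversePositions, List.foldl, List.getD]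
    try ring
  obtain _ | ⟨a3, row⟩ := row
  · simp [calc_value_ucla_three, calc_value_ucla_three_alt, pvGoA_cons, pvGoA_nil,
      pvReversePositions, List.foldl, List.getD]
    try ring
  obtain _ | ⟨a4, row⟩ := row
  · simp [calc_value_ucla_three, calc_value_ucla_three_alt, pvGoA_cons, pvGoA_nil,
      pvReversePositions, List.foldl, List.getD]
    try ring
  obtain _ | ⟨a5, row⟩ := row
  · simp [calc_value_ucla_three, calc_value_ucla_three_alt, pvGoA_cons, pvGoA_nil,
      pvReversePositions, List.foldl, List.getD]
    try ring
  obtain _ | ⟨a6, row⟩ := row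
  · simp [calc_value_ucla_three, calc_value_ucla_three_alt, pvGoA_cons, pvGoA_nil,
      pvReversePositions, List.foldl, List.getD]
    try ring
  obtain _ | ⟨a7, row⟩ := row
  · simp [calc_value_ucla_three, calc_value_ucla_three_alt, pvGoA_cons, pvGoA_nil,
      pvReversePositions, List.foldl, List.getD]
    try ring
  obtain _ | ⟨a8, row⟩ := row
  · simp [calc_value_ucla_three, calc_value_ucla_three_alt, pvGoA_cons, pvGoA_nil,
      pvReversePositions, List.foldl, List.getD]
    try ring
  obtain _ | ⟨a9, row⟩ := row
  · simp [calc_value_ucla_three, calc_value_ucla_three_alt, pvGoA_cons, pvGoA_nil,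
      pvReversePositions, List.foldl, List.getD]
    try ring
  obtain _ | ⟨a10, row⟩ := row
  · simp [calc_value_ucla_three, calc_value_ucla_three_alt, pvGoA_cons, pvGoA_nil,
      pvReversePositions, List.foldl, List.getD]
    try ring
  obtain _ | ⟨a11, row⟩ := row
  · simp [calc_value_ucla_three, calc_value_ucla_three_alt, pvGoA_cons, pvGoA_nil,
      pvReversePositions, List.foldl, List.getD]
    try ring
  obtain _ | ⟨a12, row⟩ := row
  · simp [calc_value_ucla_three, calc_value_ucla_three_alt, pvGoA_cons, pvGoA_nil,
      pvReversePositions, List.foldl, List.getD]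
    try ring
  obtain _ | ⟨a13, row⟩ := row
  · simp [calc_value_ucla_three, calc_value_ucla_three_alt, pvGoA_cons, pvGoA_nil,
      pvReversePositions, List.foldl, List.getD]
    try ring
  obtain _ | ⟨a14, row⟩ := row
  · simp [calc_value_ucla_three, calc_value_ucla_three_alt, pvGoA_cons, pvGoA_nil,
      pvReversePositions, List.foldl, List.getD]
    try ring
  obtain _ | ⟨a15, row⟩ := row
  · simp [calc_value_ucla_three, calc_value_ucla_three_alt, pvGoA_cons, pvGoA_nil,
      pvReversePositions, List.foldl, List.getD]
    try ring
  obtain _ | ⟨a16, row⟩ := row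
  · simp [calc_value_ucla_three, calc_value_ucla_three_alt, pvGoA_cons, pvGoA_nil,
      pvReversePositions, List.foldl, List.getD]
    try ring
  obtain _ | ⟨a17, row⟩ := row
  · simp [calc_value_ucla_three, calc_value_ucla_three_alt, pvGoA_cons, pvGoA_nil,
      pvReversePositions, List.foldl, List.getD]
    try ring
  obtain _ | ⟨a18, row⟩ := row
  · simp [calc_value_ucla_three, calc_value_ucla_three_alt, pvGoA_cons, pvGoA_nil,
      pvReversePositions, List.foldl, List.getD]
    try ring
  obtain _ | ⟨a19, row⟩ := row
  · simp [calc_value_ucla_three, calc_value_ucla_three_alt, pvGoA_cons, pvGoA_nil,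
      pvReversePositions, List.foldl, List.getD]
    try ring
  have hlt : ∀ k : Nat, k < 20 → k < (a0 :: a1 :: a2 :: a3 :: a4 :: a5 :: a6 :: a7 :: a8 ::
      a9 :: a10 :: a11 :: a12 :: a13 :: a14 :: a15 :: a16 :: a17 :: a18 :: a19 :: row).length := by
    intro k hk; simp; omega
  rw [calc_value_ucla_three, calc_value_ucla_three_alt]
  simp only [pvGoA_cons, pvReversePositions, List.foldl, List.getD,
    if_pos (hlt 0 (by omega)), if_pos (hlt 4 (by omega)), if_pos (hlt 5 (by omega)),
    if_pos (hlt 8 (by omega)), if_pos (hlt 9 (by omega)), if_pos (hlt 14 (by omega)),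
    if_pos (hlt 15 (by omega)), if_pos (hlt 18 (by omega)), if_pos (hlt 19 (by omega))]
  rw [pvGoA_ge20 row _ _ (by omega)]
  simp only [pvFoldlSum]
  norm_num
  ring
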